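-- pv_equiv track=rewrite | github.com/sophiakolak/Prime-Numbers- | Prime-Numbers.py | gcd_time
-- ===== SOURCE A (Python) =====
-- def gcd_time(first, second, total_runs):
--     if first>second:
--         if first % second == 0:
--             return total_runs;
--         else:
--             total_runs = total_runs + 1
--             return gcd_time(first%second, second, total_runs+1)
--     else:
--         if second % first == 0:
--             return total_runs
--         else:
--             total_runs = total_runs + 1
--             return gcd_time(first, second%first, total_runs+1)
-- ===== SOURCE B (Python) =====
-- def _euclid_steps(lo, hi):
--     # ordered Euclid: lo <= hi after the first division; each division step costs 2
--     r = hi % lo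
--     if r == 0:
--         return 0
--     return 2 + _euclid_steps(r, lo)
--
-- def gcd_time(first, second, total_runs):
--     # normalize to an ordered pair once, then run the classic Euclidean remainder
--     # recursion (no accumulator threading) and add the step cost at the end
--     return total_runs + _euclid_steps(min(first, second), max(first, second))
-- ===== Notes on version B (the rewrite author's own statement) =====
-- stated objective: alternative
-- what changed: B normalizes the pair once with min/max and runs the classic ordered Euclidean recursion (lo,hi)->(hi%lo,lo) without an accumulator, adding 2 per step at the end, instead of A's branch-on-comparison accumulator-threading recursion.
import Mathlib
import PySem

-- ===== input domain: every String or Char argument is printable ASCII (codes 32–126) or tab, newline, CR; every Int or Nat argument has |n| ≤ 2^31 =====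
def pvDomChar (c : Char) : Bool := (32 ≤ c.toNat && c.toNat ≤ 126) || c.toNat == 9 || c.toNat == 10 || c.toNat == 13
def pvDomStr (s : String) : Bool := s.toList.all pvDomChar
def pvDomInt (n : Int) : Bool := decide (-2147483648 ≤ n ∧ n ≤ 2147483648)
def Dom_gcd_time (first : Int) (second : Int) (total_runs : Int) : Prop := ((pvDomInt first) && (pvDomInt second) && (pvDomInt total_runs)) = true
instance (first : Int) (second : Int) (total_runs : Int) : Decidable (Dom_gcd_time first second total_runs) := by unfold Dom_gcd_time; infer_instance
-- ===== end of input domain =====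

-- B normalizes the pair once with min/max and runs the classic ordered Euclidean recursion
-- without an accumulator, adding 2 per step (objective: alternative decomposition, same cost).

-- ===== PORT A =====
-- A's recursion, with a fuel bound; inside Pre_ the fuel given below is never exhausted
-- (the argument sum strictly decreases each step), so this is exact there.
def gcdTimeFuel (fuel : Nat) (first second total_runs : Int) : Int :=
  match fuel with
  | 0 => 0
  | fuel + 1 =>
    if first > second then
      if PySem.Int.mod first second == 0 then total_runs
      else gcdTimeFuel fuel (PySem.Int.mod first second) second ((total_runs + 1) + 1)
    else
      if PySem.Int.mod second first == 0 then total_runs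
      else gcdTimeFuel fuel first (PySem.Int.mod second first) ((total_runs + 1) + 1)

def gcd_time (first : Int) (second : Int) (total_runs : Int) : Int :=
  gcdTimeFuel (first.natAbs + second.natAbs + 1) first second total_runs

-- ===== PORT B =====
-- B's helper _euclid_steps: classic ordered Euclid, cost 2 per division step; fuel bound
-- as above, never exhausted inside Pre_.
def euclidSteps (fuel : Nat) (lo hi : Int) : Int :=
  match fuel with
  | 0 => 0
  | fuel + 1 =>
    if PySem.Int.mod hi lo == 0 then 0
    else 2 + euclidSteps fuel (PySem.Int.mod hi lo) lo

def gcd_time_alt (first : Int) (second : Int) (total_runs : Int) : Int :=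
  total_runs + euclidSteps (first.natAbs + second.natAbs + 1) (min first second) (max first second)

-- ===== PRECONDITION & SPEC =====
-- Pre_ admits positive pairs and the immediate-exact-division inputs; outside it A raises
-- ZeroDivisionError (a zero divisor is reached) or RecursionError (the recursion never terminates).
def Pre_gcd_time (first : Int) (second : Int) (total_runs : Int) : Prop :=
  (1 ≤ first ∧ 1 ≤ second) ∨
  (first > second ∧ second ≠ 0 ∧ PySem.Int.mod first second = 0) ∨
  (first ≤ second ∧ first ≠ 0 ∧ PySem.Int.mod second first = 0)
instance (first : Int) (second : Int) (total_runs : Int) : Decidable (Pre_gcd_time first second total_runs) := by unfold Pre_gcd_time; infer_instance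

def pvWitness_gcd_time : Int × Int × Int := (6, 4, 0)

def Spec_gcd_time (first : Int) (second : Int) (total_runs : Int) (out : Int) : Prop := out = gcd_time_alt first second total_runs
instance (first : Int) (second : Int) (total_runs : Int) (out : Int) : Decidable (Spec_gcd_time first second total_runs out) := by unfold Spec_gcd_time; infer_instance

-- ===== CLAIM (what is proved, stated in full; the proofs are below) =====
def Claim_equal_gcd_time : Prop := ∀ (first : Int) (second : Int) (total_runs : Int), Dom_gcd_time first second total_runs → Pre_gcd_time first second total_runs → Spec_gcd_time first second total_runs (gcd_time first second total_runs)

-- ===== LEMMAS AND PROOFS =====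

-- A's accumulator recursion equals total_runs + B's ordered step count, given enough fuel.
theorem gcdTimeFuel_eq (fuel : Nat) : ∀ (a b tr : Int), 1 ≤ a → 1 ≤ b →
    a.natAbs + b.natAbs ≤ fuel →
    gcdTimeFuel fuel a b tr = tr + euclidSteps fuel (min a b) (max a b) := by
  induction fuel with
  | zero => intro a b tr ha hb hf; omega
  | succ n ih =>
    intro a b tr ha hb hf
    simp only [gcdTimeFuel, euclidSteps]
    by_cases h1 : a > b
    · rw [min_eq_right (le_of_lt h1), max_eq_left (le_of_lt h1)]
      simp only [if_pos h1]
      by_cases h2 : PySem.Int.mod a b == 0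
      · simp [h2]
      · simp only [if_neg h2]
        have hb' : (0:Int) < b := by omega
        have hm : PySem.Int.mod a b = a % b := PySem.Int.mod_eq_emod_of_pos hb'
        have hne : a % b ≠ 0 := by rw [← hm]; simpa using h2
        have hr0 : 0 ≤ a % b := Int.emod_nonneg a (by omega)
        have hrb : a % b < b := Int.emod_lt_of_pos a hb'
        rw [hm, ih (a % b) b (tr + 1 + 1) (by omega) hb (by omega),
            min_eq_left (le_of_lt hrb), max_eq_right (le_of_lt hrb)]
        ring
    · have h1' : a ≤ b := by omega
      rw [min_eq_left h1', max_eq_right h1']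
      simp only [if_neg h1]
      by_cases h3 : PySem.Int.mod b a == 0
      · simp [h3]
      · simp only [if_neg h3]
        have ha' : (0:Int) < a := by omega
        have hm : PySem.Int.mod b a = b % a := PySem.Int.mod_eq_emod_of_pos ha'
        have hne : b % a ≠ 0 := by rw [← hm]; simpa using h3
        have hr0 : 0 ≤ b % a := Int.emod_nonneg b (by omega)
        have hra : b % a < a := Int.emod_lt_of_pos b ha'
        rw [hm, ih a (b % a) (tr + 1 + 1) ha' (by omega) (by omega),
            min_eq_right (le_of_lt hra), max_eq_left (le_of_lt hra)]
        ring

-- ===== VERDICT (by name: the statement is the Claim_ definition above) =====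
theorem gcd_time_spec : Claim_equal_gcd_time := by
  intro f s t _ hpre
  unfold Spec_gcd_time
  rcases hpre with ⟨h1, h2⟩ | ⟨h1, _, h3⟩ | ⟨h1, _, h3⟩
  · exact gcdTimeFuel_eq _ f s t h1 h2 (by omega)
  · have hmin : min f s = s := min_eq_right (le_of_lt h1)
    have hmax : max f s = f := max_eq_left (le_of_lt h1)
    simp [gcd_time, gcd_time_alt, gcdTimeFuel, euclidSteps, h1, h3, hmin, hmax]
  · have h1' : ¬ (f > s) := by omega
    have hmin : min f s = f := min_eq_left h1
    have hmax : max f s = s := max_eq_right h1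
    simp [gcd_time, gcd_time_alt, gcdTimeFuel, euclidSteps, h1', h3, hmin, hmax]
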